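-- pv_equiv track=rewrite | github.com/DSAI-Sofian/dsai-m5-travel-assist | app/intelligence/personalization.py | _choose_travel_style
-- ===== SOURCE A (Python) =====
-- STYLE_PRIORITY = ("luxury", "budget", "food", "adventure", "general")
--
-- STYLE_KEYWORDS: dict[str, tuple[str, ...]] = {
--     "food": ("food", "foodie", "restaurant", "restaurants", "local food", "seafood"),
--     "luxury": ("luxury", "premium", "comfort", "comfortable", "upgrade"),
--     "budget": ("budget", "cheap", "cheaper", "save", "saver"),
--     "adventure": ("adventure", "hiking", "outdoors", "diving", "snorkeling", "nature"),
-- }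
--
-- def _choose_travel_style(text: str) -> str:
--     matched_styles: set[str] = set()
--
--     for style, keywords in STYLE_KEYWORDS.items():
--         if any(keyword in text for keyword in keywords):
--             matched_styles.add(style)
--
--     if not matched_styles:
--         return "general"
--
--     for style in STYLE_PRIORITY:
--         if style in matched_styles:
--             return style
--
--     return "general"
-- ===== SOURCE B (Python) =====
-- STYLE_PRIORITY = ("luxury", "budget", "food", "adventure", "general")
--
-- STYLE_KEYWORDS: dict[str, tuple[str, ...]] = {
--     "food": ("food", "foodie", "restaurant", "restaurants", "local food", "seafood"),
--     "luxury": ("luxury", "premium", "comfort", "comfortable", "upgrade"),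
--     "budget": ("budget", "cheap", "cheaper", "save", "saver"),
--     "adventure": ("adventure", "hiking", "outdoors", "diving", "snorkeling", "nature"),
-- }
--
-- def _choose_travel_style(text: str) -> str:
--     for style in STYLE_PRIORITY:
--         keywords = STYLE_KEYWORDS.get(style)
--         if keywords is None:
--             return style  # "general": unconditional fallback, no keywords
--         if any(keyword in text for keyword in keywords):
--             return style
--     return "general"
-- ===== Notes on version B (the rewrite author's own statement) =====
-- stated objective: simpler
-- what changed: Replaces the two-pass build-a-matched-set-then-scan-priority structure with a single priority-ordered scan that returns the first style whose keywords hit (styles without keywords are the unconditional fallback), eliminating the set entirely.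
import Mathlib
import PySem

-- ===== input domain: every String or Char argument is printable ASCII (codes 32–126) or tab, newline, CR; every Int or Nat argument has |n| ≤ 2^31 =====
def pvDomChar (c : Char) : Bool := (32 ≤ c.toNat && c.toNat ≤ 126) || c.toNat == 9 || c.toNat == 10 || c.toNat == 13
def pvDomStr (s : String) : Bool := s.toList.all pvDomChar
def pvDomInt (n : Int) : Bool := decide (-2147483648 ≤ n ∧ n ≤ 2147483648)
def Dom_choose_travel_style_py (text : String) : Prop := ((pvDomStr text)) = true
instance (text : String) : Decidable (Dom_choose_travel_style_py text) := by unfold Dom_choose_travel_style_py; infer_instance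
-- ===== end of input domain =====

-- B replaces A's build-matched-set-then-scan-priority two-pass structure with a single
-- priority-ordered early-returning scan (objective: simpler).


-- module-level constants shared by both versions
def STYLE_PRIORITY : List String := ["luxury", "budget", "food", "adventure", "general"]

def STYLE_KEYWORDS : PySem.Dict String (List String) :=
  PySem.Dict.ofList
  [("food", ["food", "foodie", "restaurant", "restaurants", "local food", "seafood"]),
   ("luxury", ["luxury", "premium", "comfort", "comfortable", "upgrade"]),
   ("budget", ["budget", "cheap", "cheaper", "save", "saver"]),
   ("adventure", ["adventure", "hiking", "outdoors", "diving", "snorkeling", "nature"])]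

-- ===== PORT A =====
-- second loop of A: first style of the priority tuple that is in matched_styles, else "general"
def pickFromMatched : List String → PySem.Set String → String
  | [], _ => "general"
  | st :: rest, m => if PySem.Set.contains m st then st else pickFromMatched rest m

def choose_travel_style_py (text : String) : String :=
  let matched : PySem.Set String :=
    STYLE_KEYWORDS.items.foldl
      (fun (s : PySem.Set String) p =>
        if p.2.any (fun kw => PySem.Str.isIn kw text) then PySem.Set.add s p.1 else s)
      PySem.Set.empty
  if matched = [] then "general"
  else pickFromMatched STYLE_PRIORITY matched

-- ===== PORT B =====
-- single priority-ordered scan with early return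
def scanPriority (text : String) : List String → String
  | [] => "general"
  | st :: rest =>
    match PySem.Dict.get? STYLE_KEYWORDS st with
    | none => st
    | some kws => if kws.any (fun kw => PySem.Str.isIn kw text) then st else scanPriority text rest

def choose_travel_style_py_alt (text : String) : String :=
  scanPriority text STYLE_PRIORITY

-- ===== PRECONDITION & SPEC =====
def Spec_choose_travel_style_py (text : String) (out : String) : Prop := out = choose_travel_style_py_alt text
instance (text : String) (out : String) : Decidable (Spec_choose_travel_style_py text out) := by unfold Spec_choose_travel_style_py; infer_instance

-- ===== CLAIM (what is proved, stated in full; the proofs are below) =====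
def Claim_equal_choose_travel_style_py : Prop := ∀ (text : String), Dom_choose_travel_style_py text → Spec_choose_travel_style_py text (choose_travel_style_py text)

-- ===== LEMMAS AND PROOFS =====
theorem itemsSK : STYLE_KEYWORDS.items =
    [("food", ["food", "foodie", "restaurant", "restaurants", "local food", "seafood"]),
     ("luxury", ["luxury", "premium", "comfort", "comfortable", "upgrade"]),
     ("budget", ["budget", "cheap", "cheaper", "save", "saver"]),
     ("adventure", ["adventure", "hiking", "outdoors", "diving", "snorkeling", "nature"])] := rfl

theorem gF : PySem.Dict.get? STYLE_KEYWORDS "food" = some ["food", "foodie", "restaurant", "restaurants", "local food", "seafood"] := rfl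
theorem gL : PySem.Dict.get? STYLE_KEYWORDS "luxury" = some ["luxury", "premium", "comfort", "comfortable", "upgrade"] := rfl
theorem gB : PySem.Dict.get? STYLE_KEYWORDS "budget" = some ["budget", "cheap", "cheaper", "save", "saver"] := rfl
theorem gA : PySem.Dict.get? STYLE_KEYWORDS "adventure" = some ["adventure", "hiking", "outdoors", "diving", "snorkeling", "nature"] := rfl
theorem gG : PySem.Dict.get? STYLE_KEYWORDS "general" = none := rfl

theorem choose_eq (text : String) :
    choose_travel_style_py text = choose_travel_style_py_alt text := by
  cases h3 : (["food", "foodie", "restaurant", "restaurants", "local food", "seafood"] : List String).any (fun kw => PySem.Str.isIn kw text) <;>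
  cases h1 : (["luxury", "premium", "comfort", "comfortable", "upgrade"] : List String).any (fun kw => PySem.Str.isIn kw text) <;>
  cases h2 : (["budget", "cheap", "cheaper", "save", "saver"] : List String).any (fun kw => PySem.Str.isIn kw text) <;>
  cases h4 : (["adventure", "hiking", "outdoors", "diving", "snorkeling", "nature"] : List String).any (fun kw => PySem.Str.isIn kw text) <;>
  · simp only [choose_travel_style_py, choose_travel_style_py_alt, scanPriority, STYLE_PRIORITY,
      itemsSK, gF, gL, gB, gA, gG, List.foldl_cons, List.foldl_nil, pickFromMatched,
      h1, h2, h3, h4]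
    decide

-- ===== VERDICT (by name: the statement is the Claim_ definition above) =====
theorem choose_travel_style_py_spec : Claim_equal_choose_travel_style_py := by
  intro text _
  exact choose_eq text
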